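-- pv_equiv track=rewrite | github.com/GuilhermeCLN/repo-pessoal-topcoders | Exercícios/projeto_2_inspiração.py | combinacao
-- ===== SOURCE A (Python) =====
-- def combs(lista_combs,n):
--     if n == 0:
--         return [[]]
--     saida=[]
--     for j in range(len(lista_combs)):
--         for i in combs(lista_combs[j+1:],n-1):
--             saida.append([lista_combs[j],*i])
--     return saida
--
-- def combinacao(lista_combs:list,n:int) ->list:
--     '''
--         Recebe uma lista_combs 1D que contenha todos os possíveis músicos e o instrumento que toca,
--         recebe também uma variável n indicando a quantidade de integrantes da banda
--         retorna um vetor contendo as possíveis combinações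
--     '''
--     receba=combs(lista_combs,n)
--     lista_final=[]
--     for k in receba:
--         lista_repetidos=[]
--         lista_repetidos2=[]
--         repetido=False
--         for j in k:
--             if j[1] in lista_repetidos or j[0] in lista_repetidos2:
--                 ###verifica se tem o nome repetido j[0] na nova combinação ou se tem o instrumento repetido j[1]
--                 repetido=True
--                 break
--             lista_repetidos.append(j[1])
--             lista_repetidos2.append(j[0])
--         if repetido==False:
--             lista_final.append(k)
--     return lista_final
-- ===== SOURCE B (Python) =====
-- def combinacao(lista_combs: list, n: int) -> list:
--     '''Prunes during recursive generation: a musician whose name or instrument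
--     is already used is skipped immediately, so invalid combinations are never built
--     (an alternative strategy to generate-then-filter).'''
--     def rec(items, k, names, insts):
--         if k == 0:
--             return [[]]
--         if not items:
--             return []
--         head = items[0]
--         tail = items[1:]
--         out = []
--         if head[0] not in names and head[1] not in insts:
--             names.add(head[0]); insts.add(head[1])
--             for rest in rec(tail, k - 1, names, insts):
--                 out.append([head, *rest])
--             names.discard(head[0]); insts.discard(head[1])
--         out.extend(rec(tail, k, names, insts))
--         return out
--     return rec(lista_combs, n, set(), set())
-- ===== Notes on version B (the rewrite author's own statement) =====
-- stated objective: alternative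
-- what changed: B builds combinations by structural recursion that prunes a branch as soon as a candidate's name or instrument is already used (tracked in sets), instead of A's generate-all-C(m,n)-index-combinations then filter each with inner list scans; on inputs with all-distinct names/instruments the costs are comparable.
import Mathlib
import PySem

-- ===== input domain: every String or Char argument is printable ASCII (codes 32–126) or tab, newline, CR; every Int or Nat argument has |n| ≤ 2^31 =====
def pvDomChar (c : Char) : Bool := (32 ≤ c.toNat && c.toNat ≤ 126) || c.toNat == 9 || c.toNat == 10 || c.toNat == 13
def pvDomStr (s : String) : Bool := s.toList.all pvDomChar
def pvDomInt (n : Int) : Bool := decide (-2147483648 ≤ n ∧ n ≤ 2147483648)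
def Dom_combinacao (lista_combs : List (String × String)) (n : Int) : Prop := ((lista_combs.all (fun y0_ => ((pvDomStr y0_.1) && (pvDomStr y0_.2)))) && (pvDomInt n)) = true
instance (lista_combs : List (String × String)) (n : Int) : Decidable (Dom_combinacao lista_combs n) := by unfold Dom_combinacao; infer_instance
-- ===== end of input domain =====

-- B replaces A's generate-all-combinations-then-filter by a pruned recursive generation that
-- skips a candidate whose name or instrument is already used (objective: alternative).

-- ===== PORT A =====
-- combs: 'lista_combs[j+1:]' with j ≥ 0 is exactly List.drop (j+1), and 'lista_combs[j]' with
-- j ∈ range(len(lista_combs)) is in range, so getD with a dummy default is exact.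
def combsA (lista : List (String × String)) (n : Int) : List (List (String × String)) :=
  if n = 0 then [[]]
  else
    (List.range lista.length).attach.foldl
      (fun saida j =>
        saida ++ (combsA (List.drop (j.1 + 1) lista) (n - 1)).map
          (fun i => lista.getD j.1 ("", "") :: i))
      []
termination_by lista.length
decreasing_by
  have hj := List.mem_range.mp j.2
  simp only [List.length_drop]
  omega

-- the inner 'for j in k: …' repetition check with break (reps = instruments, reps2 = names)
def hasRepA : List (String × String) → List String → List String → Bool
  | [], _, _ => false
  | j :: ks, reps, reps2 =>
    if reps.contains j.2 || reps2.contains j.1 then true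
    else hasRepA ks (reps ++ [j.2]) (reps2 ++ [j.1])

def combinacao (lista_combs : List (String × String)) (n : Int) : List (List (String × String)) :=
  (combsA lista_combs n).foldl
    (fun lista_final k => if hasRepA k [] [] = false then lista_final ++ [k] else lista_final)
    []

-- ===== PORT B =====
-- pruned recursion; names/insts are the Python sets of names/instruments already chosen
def recB (items : List (String × String)) (k : Int)
    (names insts : PySem.Set String) : List (List (String × String)) :=
  if k = 0 then [[]]
  else
    match items with
    | [] => []
    | head :: tail =>
      (if !PySem.Set.contains names head.1 && !PySem.Set.contains insts head.2 then
        (recB tail (k - 1) (PySem.Set.add names head.1) (PySem.Set.add insts head.2)).map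
          (fun rest => head :: rest)
      else [])
      ++ recB tail k names insts

def combinacao_alt (lista_combs : List (String × String)) (n : Int) : List (List (String × String)) :=
  recB lista_combs n PySem.Set.empty PySem.Set.empty

-- ===== PRECONDITION & SPEC =====
def Spec_combinacao (lista_combs : List (String × String)) (n : Int) (out : List (List (String × String))) : Prop := out = combinacao_alt lista_combs n
instance (lista_combs : List (String × String)) (n : Int) (out : List (List (String × String))) : Decidable (Spec_combinacao lista_combs n out) := by unfold Spec_combinacao; infer_instance

-- ===== CLAIM (what is proved, stated in full; the proofs are below) =====
def Claim_equal_combinacao : Prop := ∀ (lista_combs : List (String × String)) (n : Int), Dom_combinacao lista_combs n → Spec_combinacao lista_combs n (combinacao lista_combs n)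

-- ===== LEMMAS AND PROOFS =====

theorem combsA_zero (l : List (String × String)) : combsA l 0 = [[]] := by
  rw [combsA]; rfl

theorem combsA_nil (n : Int) (h : n ≠ 0) : combsA [] n = [] := by
  rw [combsA, if_neg h]; rfl

theorem combsA_eq_flatMap (l : List (String × String)) (n : Int) (h : n ≠ 0) :
    combsA l n = (List.range l.length).flatMap
      (fun j => (combsA (List.drop (j + 1) l) (n - 1)).map (fun i => l.getD j ("", "") :: i)) := by
  rw [combsA, if_neg h,
    List.foldl_attach
      (f := fun saida j => saida ++ (combsA (List.drop (j + 1) l) (n - 1)).map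
        (fun i => l.getD j ("", "") :: i)) (b := []),
    PySem.List.foldl_append_eq_flatMap]
  simp only [List.nil_append]

theorem combsA_cons (x : String × String) (xs : List (String × String)) (n : Int)
    (h : n ≠ 0) :
    combsA (x :: xs) n = (combsA xs (n - 1)).map (fun i => x :: i) ++ combsA xs n := by
  rw [combsA_eq_flatMap (x :: xs) n h]
  conv_rhs => rw [combsA_eq_flatMap xs n h]
  simp only [List.length_cons, List.range_succ_eq_map, List.flatMap_cons, List.flatMap_map,
    Nat.succ_eq_add_one, List.drop_succ_cons, List.drop_zero,
    List.getD_cons_zero, List.getD_cons_succ]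

theorem recB_eq_filter (items : List (String × String)) :
    ∀ (k : Int) (names insts : List String),
      recB items k names insts
        = (combsA items k).filter (fun c => !hasRepA c insts names) := by
  induction items with
  | nil =>
    intro k names insts
    by_cases hk : k = 0
    · subst hk; rw [recB, if_pos rfl, combsA_zero]; simp [hasRepA]
    · rw [recB, if_neg hk, combsA_nil _ hk]; rfl
  | cons head tail ih =>
    intro k names insts
    by_cases hk : k = 0
    · subst hk; rw [recB, if_pos rfl, combsA_zero]; simp [hasRepA]
    · rw [recB, if_neg hk, combsA_cons _ _ _ hk, List.filter_append, List.filter_map]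
      congr 1
      · by_cases h1 : PySem.Set.contains names head.1
        · have hmem : head.1 ∈ names := (PySem.Set.contains_iff names head.1).mp h1
          have hrep : ∀ c, hasRepA (head :: c) insts names = true := by
            intro c; simp [hasRepA, hmem]
          simp [Function.comp_def, hrep]
          exact fun hq _ => absurd hmem hq
        · by_cases h2 : PySem.Set.contains insts head.2
          · have hmem : head.2 ∈ insts := (PySem.Set.contains_iff insts head.2).mp h2
            have hrep : ∀ c, hasRepA (head :: c) insts names = true := by
              intro c; simp [hasRepA, hmem]
            simp [Function.comp_def, hrep]
            exact fun _ hq => absurd hmem hq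
          · have hm1 : head.1 ∉ names := fun hm =>
              h1 ((PySem.Set.contains_iff names head.1).mpr hm)
            have hm2 : head.2 ∉ insts := fun hm =>
              h2 ((PySem.Set.contains_iff insts head.2).mpr hm)
            simp only [h1, h2, Bool.not_false, Bool.and_self, if_pos]
            rw [PySem.Set.add_of_not_mem hm1, PySem.Set.add_of_not_mem hm2, ih]
            congr 1
            apply List.filter_congr
            intro c _
            simp [hasRepA, hm1, hm2]
      · exact ih k names insts

-- ===== VERDICT (by name: the statement is the Claim_ definition above) =====
theorem combinacao_spec : Claim_equal_combinacao := by
  intro l n _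
  show combinacao l n = combinacao_alt l n
  unfold combinacao combinacao_alt
  rw [PySem.List.foldl_append_ite_eq_filter, recB_eq_filter]
  simp only [List.nil_append]
  apply List.filter_congr
  intro c _
  show decide (hasRepA c [] [] = false) = !hasRepA c [] []
  cases hasRepA c [] [] <;> simp
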